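-- pv_equiv track=rewrite | github.com/sonegishi/hackerrank-python | Warm-up_Challenges/Jumping_on_the_Clouds.py | jumping_on_the_clouds
-- ===== SOURCE A (Python) =====
-- def jumping_on_the_clouds(c):
--     stack = list()
--     jumps = 0
--
--     for cloud in c:
--         if cloud == 0:
--             stack.append(cloud)
--             if len(stack) == 2:
--                 jumps += 1
--                 del stack[:]
--         else:
--             jumps += 1
--             if len(stack) > 1:
--                 jumps += 1
--             del stack[:]
--
--     return jumps + 1 if len(stack) > 1 else jumps
-- ===== SOURCE B (Python) =====
-- def jumping_on_the_clouds(c):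
--     # Run-based pass: each maximal run of zeros costs run_length // 2 jumps,
--     # each non-zero element costs one jump.
--     jumps = 0
--     i = 0
--     n = len(c)
--     while i < n:
--         j = i
--         if c[i] == 0:
--             while j < n and c[j] == 0:
--                 j += 1
--             jumps += (j - i) // 2
--         else:
--             while j < n and c[j] != 0:
--                 j += 1
--             jumps += j - i
--         i = j
--     return jumps
-- ===== Notes on version B (the rewrite author's own statement) =====
-- stated objective: simpler
-- what changed: Replaces A's per-element parity stack (append/clear a list, special-case jump counters) with a single run-based scan: each maximal run of zeros contributes run_length // 2 jumps and each non-zero element contributes one jump.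
import Mathlib
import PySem

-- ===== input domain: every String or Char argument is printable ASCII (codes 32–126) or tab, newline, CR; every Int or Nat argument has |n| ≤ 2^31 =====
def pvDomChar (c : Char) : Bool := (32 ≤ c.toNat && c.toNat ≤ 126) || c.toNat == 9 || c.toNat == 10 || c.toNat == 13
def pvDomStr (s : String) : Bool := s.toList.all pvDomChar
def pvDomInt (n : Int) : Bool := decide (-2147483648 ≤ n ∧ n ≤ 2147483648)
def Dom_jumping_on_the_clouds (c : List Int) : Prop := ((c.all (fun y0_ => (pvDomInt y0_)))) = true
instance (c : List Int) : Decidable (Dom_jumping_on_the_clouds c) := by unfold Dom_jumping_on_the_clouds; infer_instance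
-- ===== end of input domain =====

-- B replaces A's per-element parity stack by a run-based scan (run of zeros ↦ length // 2, non-zero ↦ 1); objective: simpler.


-- ===== PORT A =====
-- one step of A's for-loop over state (stack, jumps)
def jotcStep (s : List Int × Int) (cloud : Int) : List Int × Int :=
  if cloud = 0 then
    let stack := s.1 ++ [cloud]
    if stack.length = 2 then ([], s.2 + 1) else (stack, s.2)
  else
    let j := s.2 + 1
    let j := if s.1.length > 1 then j + 1 else j
    ([], j)

def jumping_on_the_clouds (c : List Int) : Int :=
  let s := c.foldl jotcStep ([], 0)
  if s.1.length > 1 then s.2 + 1 else s.2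

-- ===== PORT B =====
-- B's outer while loop: each iteration consumes one maximal run (the inner
-- while scans of Source B are the takeWhile/dropWhile over the tail).
def jotcRuns : List Int → Int
  | [] => 0
  | x :: xs =>
    if x = 0 then
      PySem.Int.floordiv (1 + (xs.takeWhile (fun y => y == 0)).length) 2
        + jotcRuns (xs.dropWhile (fun y => y == 0))
    else
      (1 + ((xs.takeWhile (fun y => !(y == 0))).length : Int))
        + jotcRuns (xs.dropWhile (fun y => !(y == 0)))
termination_by c => c.length
decreasing_by
  · exact Nat.lt_succ_of_le (List.length_dropWhile_le _ _)
  · exact Nat.lt_succ_of_le (List.length_dropWhile_le _ _)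

def jumping_on_the_clouds_alt (c : List Int) : Int := jotcRuns c

-- ===== PRECONDITION & SPEC =====
def Spec_jumping_on_the_clouds (c : List Int) (out : Int) : Prop := out = jumping_on_the_clouds_alt c
instance (c : List Int) (out : Int) : Decidable (Spec_jumping_on_the_clouds c out) := by unfold Spec_jumping_on_the_clouds; infer_instance

-- ===== CLAIM (what is proved, stated in full; the proofs are below) =====
def Claim_equal_jumping_on_the_clouds : Prop := ∀ (c : List Int), Dom_jumping_on_the_clouds c → Spec_jumping_on_the_clouds c (jumping_on_the_clouds c)

-- ===== LEMMAS AND PROOFS =====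

-- reference parity-counter: p records whether A's stack holds one pending zero
def jotcJ : Bool → List Int → Int
  | _, [] => 0
  | p, x :: xs => if x = 0 then (if p then 1 + jotcJ false xs else jotcJ true xs) else 1 + jotcJ false xs

-- A's fold from a legal state (stack = [] or [0]) accumulates jotcJ and keeps the stack legal
theorem jotc_fold (c : List Int) : ∀ (st : List Int) (j : Int), (st = [] ∨ st = [(0:Int)]) →
    (c.foldl jotcStep (st, j)).2 = j + jotcJ (st ≠ []) c ∧
    ((c.foldl jotcStep (st, j)).1 = [] ∨ (c.foldl jotcStep (st, j)).1 = [(0:Int)]) := by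
  induction c with
  | nil => intro st j h; exact ⟨by simp [jotcJ], h⟩
  | cons x xs ih =>
    intro st j hst
    rcases hst with h | h <;> subst h <;>
      by_cases hx : x = 0 <;>
      simp only [List.foldl_cons, jotcStep, hx, jotcJ, if_true, if_false,
        List.nil_append, List.cons_append, List.length] <;>
      simp_all <;> ring

-- jotcJ over a run of zeros followed by a block whose head is non-zero (or empty)
theorem jotcJ_zeros (run : List Int) (rest : List Int)
    (hrun : ∀ y ∈ run, y = 0) (hrest : rest = [] ∨ ∃ z zs, rest = z :: zs ∧ z ≠ 0) :
    jotcJ false (run ++ rest) = (run.length : Int) / 2 + jotcJ false rest ∧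
    jotcJ true (run ++ rest) = (1 + run.length : Int) / 2 + jotcJ false rest := by
  induction run with
  | nil =>
    constructor
    · simp
    · rcases hrest with h | ⟨z, zs, h, hz⟩ <;> subst h <;> simp [jotcJ]
      simp [hz]
  | cons y run ih =>
    have hy : y = 0 := hrun y (List.mem_cons_self ..)
    have ih' := ih (fun z hz => hrun z (List.mem_cons_of_mem _ hz)) 
    obtain ⟨h0, h1⟩ := ih'
    subst hy
    constructor
    · simp only [List.cons_append, jotcJ, if_true]
      rw [h1]
      simp only [List.length_cons]
      push_cast
      omega
    · simp only [List.cons_append, jotcJ, if_true]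
      rw [h0]
      simp only [List.length_cons]
      push_cast
      omega

-- jotcJ over a run of non-zeros: one jump each, parity irrelevant afterwards
theorem jotcJ_nonzeros (run : List Int) (rest : List Int) (hrun : ∀ y ∈ run, y ≠ 0) :
    jotcJ false (run ++ rest) = (run.length : Int) + jotcJ false rest := by
  induction run with
  | nil => simp
  | cons y run ih =>
    have hy := hrun y (List.mem_cons_self ..)
    simp only [List.cons_append, jotcJ, hy, if_false, List.length_cons]
    rw [ih (fun z hz => hrun z (List.mem_cons_of_mem _ hz))]
    push_cast; ring

-- head of dropWhile fails the predicate
theorem drop_head {p : Int → Bool} (xs : List Int) :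
    xs.dropWhile p = [] ∨ ∃ z zs, xs.dropWhile p = z :: zs ∧ p z = false := by
  rcases h : xs.dropWhile p with _ | ⟨z, zs⟩
  · exact Or.inl rfl
  · refine Or.inr ⟨z, zs, rfl, ?_⟩
    have := List.head_dropWhile_not p (l := xs) (by simp [h])
    simp [h] at this; exact this

theorem jotcRuns_eq_jotcJ (c : List Int) : jotcRuns c = jotcJ false c := by
  induction c using jotcRuns.induct with
  | case1 => simp [jotcRuns, jotcJ]
  | case2 xs ih =>
    have hzeros : ∀ y ∈ xs.takeWhile (fun y => y == 0), y = 0 := by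
      intro y hy; simpa using List.mem_takeWhile_imp hy
    have hrest' : xs.dropWhile (fun y => y == 0) = [] ∨
        ∃ z zs, xs.dropWhile (fun y => y == 0) = z :: zs ∧ z ≠ 0 := by
      rcases drop_head (p := fun y => y == 0) xs with h | ⟨z, zs, h, hz⟩
      · exact Or.inl h
      · exact Or.inr ⟨z, zs, h, by simpa using hz⟩
    have hJ := (jotcJ_zeros _ _ hzeros hrest').2
    rw [List.takeWhile_append_dropWhile] at hJ
    have hL : jotcJ false ((0:Int) :: xs) = jotcJ true xs := by simp [jotcJ]
    rw [jotcRuns, if_pos rfl, hL, hJ, ih,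
      PySem.Int.floordiv_eq_ediv_of_pos (a := 1 + ((xs.takeWhile (fun y => y == 0)).length : Int)) (by omega)]
  | case3 x xs hx ih =>
    have hnz : ∀ y ∈ xs.takeWhile (fun y => !(y == 0)), y ≠ 0 := by
      intro y hy; simpa using List.mem_takeWhile_imp hy
    have hJ := jotcJ_nonzeros _ (xs.dropWhile (fun y => !(y == 0))) hnz
    rw [List.takeWhile_append_dropWhile] at hJ
    have hL : jotcJ false (x :: xs) = 1 + jotcJ false xs := by simp [jotcJ, hx]
    rw [jotcRuns, if_neg hx, hL, hJ, ih]
    ring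

-- ===== VERDICT (by name: the statement is the Claim_ definition above) =====
theorem jumping_on_the_clouds_spec : Claim_equal_jumping_on_the_clouds := by
  intro c _
  unfold Spec_jumping_on_the_clouds jumping_on_the_clouds jumping_on_the_clouds_alt
  obtain ⟨h2, h1⟩ := jotc_fold c [] 0 (Or.inl rfl)
  rw [jotcRuns_eq_jotcJ]
  rcases h1 with h | h <;> simp [h, h2]
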